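-- pv_equiv track=rewrite | github.com/AlticeLabsProjects/meocloud-cli | strings/convert_to_native_format.py | string_to_linux
-- ===== SOURCE A (Python) =====
-- def string_to_linux(line):
--     assert '=' in line
--     key, _, value = line.partition('=')
--     key = key.strip(' ')[1:-1]
--     value = value.strip(' ')[1:-1]
--     # escape '
--     value = value.replace("'", "\\'")
--     # unescape "
--     value = value.replace('\\"', '"')
--     value = value.replace('{', '{{')
--     value = value.replace('}', '}}')
--     value_parts = []
--     for i, part in enumerate(value.split('%S')):
--         value_parts.append(part)
--         value_parts.append('{' + str(i) + '}')
--     value = ''.join(value_parts[:-1])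
--     return "        '{0}': '{1}',".format(key, value)
-- ===== SOURCE B (Python) =====
-- def string_to_linux(line):
--     # single left-to-right scan does quote-escaping, brace-doubling and
--     # %S -> {0},{1},... numbering in one pass (A chains four .replace calls
--     # plus a split/enumerate/join/trim pipeline)
--     assert '=' in line
--     key, _, value = line.partition('=')
--     key = key.strip(' ')[1:-1]
--     value = value.strip(' ')[1:-1]
--     out = []
--     j = 0
--     n = 0
--     while j < len(value):
--         c = value[j]
--         if c == "'":
--             out.append("\\'")
--             j += 1
--         elif c == '\\' and j + 1 < len(value) and value[j + 1] == '"':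
--             out.append('"')
--             j += 2
--         elif c == '{':
--             out.append('{{')
--             j += 1
--         elif c == '}':
--             out.append('}}')
--             j += 1
--         elif c == '%' and j + 1 < len(value) and value[j + 1] == 'S':
--             out.append('{' + str(n) + '}')
--             n += 1
--             j += 2
--         else:
--             out.append(c)
--             j += 1
--     return "        '" + key + "': '" + ''.join(out) + "',"
-- ===== Notes on version B (the rewrite author's own statement) =====
-- stated objective: alternative
-- what changed: A's four sequential .replace passes plus a split('%S')/enumerate/append/join/trim pipeline are replaced by a single left-to-right character scan that escapes quotes, doubles braces and numbers the %S placeholders in one pass.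
import Mathlib
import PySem

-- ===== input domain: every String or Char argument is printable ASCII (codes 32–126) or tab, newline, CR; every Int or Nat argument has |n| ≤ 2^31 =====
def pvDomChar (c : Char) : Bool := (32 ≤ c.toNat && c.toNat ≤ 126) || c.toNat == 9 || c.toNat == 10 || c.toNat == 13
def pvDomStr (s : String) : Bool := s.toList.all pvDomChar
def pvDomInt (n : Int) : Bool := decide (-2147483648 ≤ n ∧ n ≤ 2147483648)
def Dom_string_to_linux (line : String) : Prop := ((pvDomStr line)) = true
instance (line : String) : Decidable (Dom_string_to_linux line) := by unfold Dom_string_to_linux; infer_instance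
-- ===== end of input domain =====

-- B replaces A's four .replace passes + split/enumerate/join/trim pipeline by one
-- left-to-right character scan (objective: alternative structure, same cost).

-- ===== PORT A =====
-- Python str.partition('=') when '=' occurs at index i: (line[:i], '=', line[i+1:]).
-- The assert makes A raise AssertionError when '=' is absent; that input is outside
-- Pre_string_to_linux and the port returns "" there.
def string_to_linux (line : String) : String :=
  if PySem.Str.isIn "=" line then
    let i := PySem.Str.find line "="
    let key := PySem.Str.slice line none (some i)
    let value := PySem.Str.slice line (some (i + 1)) none
    let key := PySem.Str.slice (PySem.Str.stripChars key " ") (some 1) (some (-1))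
    let value := PySem.Str.slice (PySem.Str.stripChars value " ") (some 1) (some (-1))
    let value := PySem.Str.replace value "'" "\\'"
    let value := PySem.Str.replace value "\\\"" "\""
    let value := PySem.Str.replace value "{" "{{"
    let value := PySem.Str.replace value "}" "}}"
    -- value.split('%S'): sep is the nonempty literal "%S", so split? is always some
    let parts := (PySem.Str.split? value "%S").getD []
    let valueParts := (PySem.List.enumerate parts).foldl
      (fun acc ip => acc ++ [ip.2, "{" ++ PySem.Int.toStr ip.1 ++ "}"]) ([] : List String)
    let value := PySem.Str.join "" (PySem.List.slice valueParts none (some (-1)))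
    "        '" ++ key ++ "': '" ++ value ++ "',"
  else ""

-- ===== PORT B =====
-- B's while loop over j: structural recursion on the remaining characters, carrying
-- the placeholder counter n; branches in Source B's order.
def pvScanB : List Char → Int → List Char
  | [], _ => []
  | '\''::t, n => '\\' :: '\'' :: pvScanB t n
  | '\\'::'"'::t, n => '"' :: pvScanB t n
  | '{'::t, n => '{' :: '{' :: pvScanB t n
  | '}'::t, n => '}' :: '}' :: pvScanB t n
  | '%'::'S'::t, n => ('{' :: (PySem.Int.toStr n).toList ++ ['}']) ++ pvScanB t (n + 1)
  | c::t, n => c :: pvScanB t n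

def string_to_linux_alt (line : String) : String :=
  if PySem.Str.isIn "=" line then
    let i := PySem.Str.find line "="
    let key := PySem.Str.slice line none (some i)
    let value := PySem.Str.slice line (some (i + 1)) none
    let key := PySem.Str.slice (PySem.Str.stripChars key " ") (some 1) (some (-1))
    let value := PySem.Str.slice (PySem.Str.stripChars value " ") (some 1) (some (-1))
    "        '" ++ key ++ "': '" ++ String.ofList (pvScanB value.toList 0) ++ "',"
  else ""

-- ===== PRECONDITION & SPEC =====
-- A asserts '=' in line (AssertionError otherwise); Pre_ is exactly that.
def Pre_string_to_linux (line : String) : Prop := PySem.Str.isIn "=" line = true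
instance (line : String) : Decidable (Pre_string_to_linux line) := by unfold Pre_string_to_linux; infer_instance
def pvWitness_string_to_linux : String := " 'greet' = 'Hi %S' "

def Spec_string_to_linux (line : String) (out : String) : Prop := out = string_to_linux_alt line
instance (line : String) (out : String) : Decidable (Spec_string_to_linux line out) := by unfold Spec_string_to_linux; infer_instance

-- ===== CLAIM (what is proved, stated in full; the proofs are below) =====
def Claim_equal_string_to_linux : Prop := ∀ (line : String), Dom_string_to_linux line → Pre_string_to_linux line → Spec_string_to_linux line (string_to_linux line)

-- ===== LEMMAS AND PROOFS =====

-- Simple structural recursions characterising PySem.Chars.replace / splitOn (fuel-free).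
def pvRep (old new : List Char) : List Char → List Char
  | [] => []
  | c :: t =>
    if old.isPrefixOf (c :: t) then new ++ pvRep old new (t.drop (old.length - 1))
    else c :: pvRep old new t
termination_by l => l.length
decreasing_by all_goals (simp; try omega)

theorem pvRep_go (old new : List Char) (h : old ≠ []) :
    ∀ (fuel : Nat) (l acc : List Char), l.length ≤ fuel →
      PySem.Chars.replace.go old new fuel l acc = acc.reverse ++ pvRep old new l := by
  intro fuel
  induction fuel with
  | zero =>
    intro l acc hl
    have : l = [] := by cases l <;> simp_all
    subst this
    rw [PySem.Chars.replace.go.eq_def]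
    simp [pvRep]
  | succ fuel ih =>
    intro l acc hl
    cases l with
    | nil => rw [PySem.Chars.replace.go.eq_def]; simp [pvRep]
    | cons c t =>
      rw [PySem.Chars.replace.go.eq_def]
      simp only []
      by_cases hp : old.isPrefixOf (c :: t) = true
      · rw [if_pos hp]
        have hlen : (List.drop old.length (c :: t)).length ≤ fuel := by
          have : 1 ≤ old.length := by cases old <;> simp_all
          simp at hl ⊢
          omega
        rw [ih _ _ hlen]
        have hdrop : List.drop old.length (c :: t) = t.drop (old.length - 1) := by
          cases old with
          | nil => exact absurd rfl h
          | cons o os => simp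
        rw [hdrop]
        simp [pvRep, hp]
      · rw [if_neg hp]
        have hlen : t.length ≤ fuel := by simp at hl; omega
        rw [ih _ _ hlen]
        simp [pvRep, hp]

theorem pvRep_eq (s old new : List Char) (h : old ≠ []) :
    PySem.Chars.replace s old new = pvRep old new s := by
  unfold PySem.Chars.replace
  rw [if_neg (by cases old <;> simp_all)]
  rw [pvRep_go old new h s.length s [] (le_refl _)]
  simp

def pvSplit (sep : List Char) : List Char → List (List Char)
  | [] => [[]]
  | c :: t =>
    if sep.isPrefixOf (c :: t) then [] :: pvSplit sep (t.drop (sep.length - 1))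
    else (pvSplit sep t).modifyHead (c :: ·)
termination_by l => l.length
decreasing_by all_goals (simp; try omega)

theorem pvSplit_ne_nil (sep l) : pvSplit sep l ≠ [] := by
  induction l using pvSplit.induct sep with
  | case1 => simp [pvSplit]
  | case2 c t hp ih => simp [pvSplit, hp]
  | case3 c t hp ih =>
    simp only [pvSplit, if_neg hp]
    cases h : pvSplit sep t with
    | nil => exact absurd h ih
    | cons a b => simp

theorem pvModify_ne_nil {α : Type} (f : α → α) (l : List α) (h : l ≠ []) :
    l.modifyHead f ≠ [] := by cases l <;> simp_all

theorem pvSplit_go (sep : List Char) (h : sep ≠ []) :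
    ∀ (fuel : Nat) (l cur : List Char) (acc : List (List Char)), l.length < fuel →
      PySem.Chars.splitOn.go sep fuel l cur acc
        = acc.reverse ++ (pvSplit sep l).modifyHead (cur.reverse ++ ·) := by
  intro fuel
  induction fuel with
  | zero => intro l cur acc hl; exact absurd hl (by omega)
  | succ fuel ih =>
    intro l cur acc hl
    cases l with
    | nil => rw [PySem.Chars.splitOn.go.eq_def]; simp [pvSplit]
    | cons c t =>
      rw [PySem.Chars.splitOn.go.eq_def]
      simp only []
      by_cases hp : sep.isPrefixOf (c :: t) = true
      · rw [if_pos hp]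
        have hlen : (List.drop sep.length (c :: t)).length < fuel := by
          have : 1 ≤ sep.length := by cases sep <;> simp_all
          simp at hl ⊢
          omega
        rw [ih _ _ _ hlen]
        have hdrop : List.drop sep.length (c :: t) = t.drop (sep.length - 1) := by
          cases sep with
          | nil => exact absurd rfl h
          | cons o os => simp
        rw [hdrop]
        simp only [pvSplit, hp, if_pos, List.reverse_cons, List.append_assoc,
          List.reverse_nil, List.nil_append, List.modifyHead_cons, List.singleton_append]
        cases pvSplit sep (List.drop (sep.length - 1) t) <;> simp
      · rw [if_neg hp]
        have hlen : t.length < fuel := by simp at hl; omega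
        rw [ih _ _ _ hlen]
        simp only [pvSplit, if_neg hp, List.modifyHead_modifyHead]
        congr 1
        congr 1
        funext x
        simp

theorem pvSplit_eq (s sep : List Char) (h : sep ≠ []) :
    PySem.Chars.splitOn s sep = pvSplit sep s := by
  unfold PySem.Chars.splitOn
  rw [pvSplit_go sep h (s.length + 1) s [] [] (by omega)]
  simp
  cases hs : pvSplit sep s with
  | nil => exact absurd hs (pvSplit_ne_nil sep s)
  | cons a b => simp

-- the four replace stages of A, on lists
def pvR1 (l : List Char) : List Char := pvRep ['\''] ['\\', '\''] l
def pvR2 (l : List Char) : List Char := pvRep ['\\', '"'] ['"'] l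
def pvR3 (l : List Char) : List Char := pvRep ['{'] ['{', '{'] l
def pvR4 (l : List Char) : List Char := pvRep ['}'] ['}', '}'] l
def pvChain (l : List Char) : List Char := pvR4 (pvR3 (pvR2 (pvR1 l)))

theorem pvRep_single_cons (a : Char) (w : List Char) (c : Char) (t : List Char) :
    pvRep [a] w (c :: t) = if a = c then w ++ pvRep [a] w t else c :: pvRep [a] w t := by
  rw [pvRep]
  have hpf : ([a].isPrefixOf (c :: t)) = decide (a = c) := by
    simp [List.isPrefixOf, beq_eq_decide]
  rw [hpf]
  by_cases h : a = c <;> simp [h]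

theorem pvRep_pair_cons₂ (a b : Char) (w : List Char) (c d : Char) (t : List Char) :
    pvRep [a, b] w (c :: d :: t)
      = if a = c ∧ b = d then w ++ pvRep [a, b] w t
        else c :: pvRep [a, b] w (d :: t) := by
  rw [pvRep]
  have hpf : ([a, b].isPrefixOf (c :: d :: t)) = decide (a = c ∧ b = d) := by
    by_cases h1 : a = c <;> by_cases h2 : b = d <;> simp [List.isPrefixOf, h1, h2]
  rw [hpf]
  by_cases h : a = c ∧ b = d <;> simp [h]

theorem pvRep_pair_one (a b : Char) (w : List Char) (c : Char) :
    pvRep [a, b] w [c] = [c] := by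
  rw [pvRep]
  simp [List.isPrefixOf, pvRep]

-- per-stage cons equations
theorem pvR1_quote (t) : pvR1 ('\'' :: t) = '\\' :: '\'' :: pvR1 t := by
  unfold pvR1; rw [pvRep_single_cons]; simp

theorem pvR1_cons (c t) (h : c ≠ '\'') : pvR1 (c :: t) = c :: pvR1 t := by
  unfold pvR1; rw [pvRep_single_cons, if_neg (Ne.symm h)]

theorem pvR2_bq (t) : pvR2 ('\\' :: '"' :: t) = '"' :: pvR2 t := by
  unfold pvR2; rw [pvRep_pair_cons₂]; simp

theorem pvR2_cons (c l) (h : c ≠ '\\') : pvR2 (c :: l) = c :: pvR2 l := by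
  unfold pvR2
  cases l with
  | nil => rw [pvRep_pair_one]; simp [pvRep]
  | cons d l' =>
    rw [pvRep_pair_cons₂, if_neg (by rintro ⟨e, -⟩; exact h e.symm)]

theorem pvR2_bs (l) (h : l.head? ≠ some '"') : pvR2 ('\\' :: l) = '\\' :: pvR2 l := by
  unfold pvR2
  cases l with
  | nil => rw [pvRep_pair_one]; simp [pvRep]
  | cons d l' =>
    have hd : ¬('\\' = '\\' ∧ '"' = d) := by
      rintro ⟨-, hq⟩
      exact h (by simp [← hq])
    rw [pvRep_pair_cons₂, if_neg hd]

theorem pvR3_brace (t) : pvR3 ('{' :: t) = '{' :: '{' :: pvR3 t := by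
  unfold pvR3; rw [pvRep_single_cons]; simp

theorem pvR3_cons (c t) (h : c ≠ '{') : pvR3 (c :: t) = c :: pvR3 t := by
  unfold pvR3; rw [pvRep_single_cons, if_neg (Ne.symm h)]

theorem pvR4_brace (t) : pvR4 ('}' :: t) = '}' :: '}' :: pvR4 t := by
  unfold pvR4; rw [pvRep_single_cons]; simp

theorem pvR4_cons (c t) (h : c ≠ '}') : pvR4 (c :: t) = c :: pvR4 t := by
  unfold pvR4; rw [pvRep_single_cons, if_neg (Ne.symm h)]

-- split on the literal separator "%S"
theorem pvSplitPS_pct_S (t) :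
    pvSplit ['%', 'S'] ('%' :: 'S' :: t) = [] :: pvSplit ['%', 'S'] t := by
  rw [pvSplit]; simp [List.isPrefixOf]

theorem pvSplitPS_cons (c l) (h : c ≠ '%') :
    pvSplit ['%', 'S'] (c :: l) = (pvSplit ['%', 'S'] l).modifyHead (c :: ·) := by
  rw [pvSplit]
  have : (['%', 'S'].isPrefixOf (c :: l)) = false := by
    cases l <;> simp [List.isPrefixOf] <;> intro e <;> exact absurd e.symm h
  simp [this]

theorem pvSplitPS_pct (l) (h : l.head? ≠ some 'S') :
    pvSplit ['%', 'S'] ('%' :: l) = (pvSplit ['%', 'S'] l).modifyHead ('%' :: ·) := by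
  rw [pvSplit]
  have : (['%', 'S'].isPrefixOf ('%' :: l)) = false := by
    cases l with
    | nil => simp [List.isPrefixOf]
    | cons d l' =>
      simp [List.isPrefixOf]
      intro e
      exact absurd (by simp [← e]) h
  simp [this]

-- head-shape preservation through the stages
theorem pvR1_head (t : List Char) (x : Char) (hx : x ≠ '\'') (hx2 : x ≠ '\\')
    (h : t.head? ≠ some x) : (pvR1 t).head? ≠ some x := by
  cases t with
  | nil => simp [pvR1, pvRep]
  | cons c t =>
    by_cases hc : c = '\''
    · subst hc
      rw [pvR1_quote]
      intro hcon
      rw [List.head?_cons] at hcon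
      exact hx2 (Option.some.inj hcon).symm
    · rw [pvR1_cons c t hc]; simpa using h

theorem pvR2_head (t : List Char) (x : Char) (hx : x ≠ '"') (hx2 : x ≠ '\\')
    (h : t.head? ≠ some x) : (pvR2 t).head? ≠ some x := by
  cases t with
  | nil => simp [pvR2, pvRep]
  | cons c t =>
    by_cases hc : c = '\\'
    · subst hc
      by_cases ht : t.head? = some '"'
      · cases t with
        | nil => simp at ht
        | cons d t' =>
          simp at ht
          subst ht
          rw [pvR2_bq]
          intro hcon
          rw [List.head?_cons] at hcon
          exact hx (Option.some.inj hcon).symm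
      · rw [pvR2_bs t ht]
        intro hcon
        rw [List.head?_cons] at hcon
        exact hx2 (Option.some.inj hcon).symm
    · rw [pvR2_cons c t hc]; simpa using h

theorem pvR3_head (t : List Char) (x : Char) (hx : x ≠ '{')
    (h : t.head? ≠ some x) : (pvR3 t).head? ≠ some x := by
  cases t with
  | nil => simp [pvR3, pvRep]
  | cons c t =>
    by_cases hc : c = '{'
    · subst hc
      rw [pvR3_brace]
      intro hcon
      rw [List.head?_cons] at hcon
      exact hx (Option.some.inj hcon).symm
    · rw [pvR3_cons c t hc]; simpa using h

theorem pvR4_head (t : List Char) (x : Char) (hx : x ≠ '}')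
    (h : t.head? ≠ some x) : (pvR4 t).head? ≠ some x := by
  cases t with
  | nil => simp [pvR4, pvRep]
  | cons c t =>
    by_cases hc : c = '}'
    · subst hc
      rw [pvR4_brace]
      intro hcon
      rw [List.head?_cons] at hcon
      exact hx (Option.some.inj hcon).symm
    · rw [pvR4_cons c t hc]; simpa using h

theorem pvChain_headS (t : List Char) (h : t.head? ≠ some 'S') :
    (pvChain t).head? ≠ some 'S' := by
  unfold pvChain
  apply pvR4_head _ _ (by decide)
  apply pvR3_head _ _ (by decide)
  apply pvR2_head _ _ (by decide) (by decide)
  exact pvR1_head _ _ (by decide) (by decide) h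

-- interleave parts with numbered {i} placeholders (A's loop + trim + join, closed)
def pvIvl : Int → List (List Char) → List Char
  | _, [] => []
  | _, [p] => p
  | n, p :: ps => p ++ '{' :: ((PySem.Int.toStr n).toList ++ '}' :: pvIvl (n + 1) ps)

theorem pvIvl_cons (n : Int) (p : List Char) (ps : List (List Char)) (h : ps ≠ []) :
    pvIvl n (p :: ps) = p ++ '{' :: ((PySem.Int.toStr n).toList ++ '}' :: pvIvl (n + 1) ps) := by
  cases ps with
  | nil => exact absurd rfl h
  | cons q qs => rfl

theorem pvIvl_modifyHead (n : Int) (c : Char) (l : List (List Char)) (h : l ≠ []) :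
    pvIvl n (l.modifyHead (c :: ·)) = c :: pvIvl n l := by
  cases l with
  | nil => exact absurd rfl h
  | cons p ps =>
    cases ps with
    | nil => rfl
    | cons q qs => simp [pvIvl]

-- MAIN LEMMA: A's replace/split/enumerate pipeline equals B's one-pass scan
theorem pvMain : ∀ (t : List Char) (n : Int),
    pvIvl n (pvSplit ['%', 'S'] (pvChain t)) = pvScanB t n := by
  intro t n
  induction t, n using pvScanB.induct with
  | case1 n => simp [pvChain, pvR1, pvR2, pvR3, pvR4, pvRep, pvSplit, pvIvl, pvScanB]
  | case2 t n ih =>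
    simp only [pvChain] at ih ⊢
    rw [pvR1_quote, pvR2_bs _ (by simp), pvR2_cons _ _ (by decide),
      pvR3_cons _ _ (by decide), pvR3_cons _ _ (by decide),
      pvR4_cons _ _ (by decide), pvR4_cons _ _ (by decide),
      pvSplitPS_cons _ _ (by decide), pvSplitPS_cons _ _ (by decide),
      pvIvl_modifyHead _ _ _ (pvModify_ne_nil _ _ (pvSplit_ne_nil _ _)),
      pvIvl_modifyHead _ _ _ (pvSplit_ne_nil _ _), ih, pvScanB.eq_2]
  | case3 t n ih =>
    simp only [pvChain] at ih ⊢
    rw [pvR1_cons _ _ (by decide), pvR1_cons _ _ (by decide), pvR2_bq,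
      pvR3_cons _ _ (by decide), pvR4_cons _ _ (by decide),
      pvSplitPS_cons _ _ (by decide),
      pvIvl_modifyHead _ _ _ (pvSplit_ne_nil _ _), ih, pvScanB.eq_3]
  | case4 t n ih =>
    simp only [pvChain] at ih ⊢
    rw [pvR1_cons _ _ (by decide), pvR2_cons _ _ (by decide), pvR3_brace,
      pvR4_cons _ _ (by decide), pvR4_cons _ _ (by decide),
      pvSplitPS_cons _ _ (by decide), pvSplitPS_cons _ _ (by decide),
      pvIvl_modifyHead _ _ _ (pvModify_ne_nil _ _ (pvSplit_ne_nil _ _)),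
      pvIvl_modifyHead _ _ _ (pvSplit_ne_nil _ _), ih, pvScanB.eq_4]
  | case5 t n ih =>
    simp only [pvChain] at ih ⊢
    rw [pvR1_cons _ _ (by decide), pvR2_cons _ _ (by decide),
      pvR3_cons _ _ (by decide), pvR4_brace,
      pvSplitPS_cons _ _ (by decide), pvSplitPS_cons _ _ (by decide),
      pvIvl_modifyHead _ _ _ (pvModify_ne_nil _ _ (pvSplit_ne_nil _ _)),
      pvIvl_modifyHead _ _ _ (pvSplit_ne_nil _ _), ih, pvScanB.eq_5]
  | case6 t n ih =>
    simp only [pvChain] at ih ⊢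
    rw [pvR1_cons _ _ (by decide), pvR1_cons _ _ (by decide),
      pvR2_cons _ _ (by decide), pvR2_cons _ _ (by decide),
      pvR3_cons _ _ (by decide), pvR3_cons _ _ (by decide),
      pvR4_cons _ _ (by decide), pvR4_cons _ _ (by decide),
      pvSplitPS_pct_S,
      pvIvl_cons _ _ _ (pvSplit_ne_nil _ _), ih, pvScanB.eq_6]
    simp
  | case7 c t n h1 h2 h3 h4 h5 ih =>
    simp only [pvChain] at ih ⊢
    rw [pvR1_cons _ _ (fun e => h1 e)]
    by_cases hb : c = '\\'
    · subst hb
      have ht : t.head? ≠ some '"' := by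
        intro hh
        cases t with
        | nil => simp at hh
        | cons d t' =>
          simp at hh
          exact h2 t' rfl (by rw [hh])
      rw [pvR2_bs _ (pvR1_head t '"' (by decide) (by decide) ht),
        pvR3_cons _ _ (by decide), pvR4_cons _ _ (by decide),
        pvSplitPS_cons _ _ (by decide),
        pvIvl_modifyHead _ _ _ (pvSplit_ne_nil _ _), ih,
        pvScanB.eq_7 _ _ _ h1 h2 h3 h4 h5]
    · rw [pvR2_cons _ _ hb]
      rw [pvR3_cons _ _ (fun e => h3 e), pvR4_cons _ _ (fun e => h4 e)]
      by_cases hp : c = '%'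
      · subst hp
        have ht : t.head? ≠ some 'S' := by
          intro hh
          cases t with
          | nil => simp at hh
          | cons d t' =>
            simp at hh
            exact h5 t' rfl (by rw [hh])
        rw [pvSplitPS_pct (pvR4 (pvR3 (pvR2 (pvR1 t))))
          (by have hs := pvChain_headS t ht; unfold pvChain at hs; exact hs)]
        rw [pvIvl_modifyHead _ _ _ (pvSplit_ne_nil _ _), ih,
          pvScanB.eq_7 _ _ _ h1 h2 h3 h4 h5]
      · rw [pvSplitPS_cons _ _ hp]
        rw [pvIvl_modifyHead _ _ _ (pvSplit_ne_nil _ _), ih,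
          pvScanB.eq_7 _ _ _ h1 h2 h3 h4 h5]

-- A's enumerate/fold/trim/join loop equals pvIvl
theorem pvFlat_ne_nil (parts : List String) (h : parts ≠ []) (n : Int) :
    (PySem.List.enumerate parts n).flatMap
      (fun ip => [ip.2, "{" ++ PySem.Int.toStr ip.1 ++ "}"]) ≠ [] := by
  cases parts with
  | nil => exact absurd rfl h
  | cons p ps => simp [PySem.List.enumerate]

theorem pvJoin_nil_flatten (l : List (List Char)) :
    PySem.Chars.join [] l = l.flatten := by
  induction l with
  | nil => simp [PySem.Chars.join, List.intercalate]
  | cons a l ih =>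
    cases l with
    | nil => simp [PySem.Chars.join, List.intercalate]
    | cons b m =>
      rw [PySem.Chars.join_cons_cons]
      simp only [List.flatten_cons]
      rw [ih]
      simp

theorem pvLoop (parts : List String) (h : parts ≠ []) (n : Int) :
    PySem.Chars.join []
        ((((PySem.List.enumerate parts n).flatMap
            (fun ip => [ip.2, "{" ++ PySem.Int.toStr ip.1 ++ "}"])).dropLast).map String.toList)
      = pvIvl n (parts.map String.toList) := by
  induction parts generalizing n with
  | nil => exact absurd rfl h
  | cons p ps ih =>
    cases ps with
    | nil =>
      simp [PySem.List.enumerate, pvIvl, pvJoin_nil_flatten]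
    | cons q qs =>
      have ih' := ih (by simp) (n + 1)
      rw [PySem.List.enumerate]
      simp only [List.flatMap_cons]
      have hflat := pvFlat_ne_nil (q :: qs) (by simp) (n + 1)
      rw [List.dropLast_append_of_ne_nil hflat]
      rw [List.map_append, pvJoin_nil_flatten, List.flatten_append]
      rw [pvJoin_nil_flatten] at ih'
      rw [ih']
      simp only [List.map_cons]
      rw [pvIvl_cons n p.toList (q.toList :: List.map String.toList qs) (by simp)]
      simp [String.toList_append, PySem.Int.toStr]

theorem pvChainStr (v : String) :
    (PySem.Str.replace
        (PySem.Str.replace (PySem.Str.replace (PySem.Str.replace v "'" "\\'") "\\\"" "\"") "{" "{{")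
        "}" "}}").toList = pvChain v.toList := by
  simp only [PySem.Str.toList_replace]
  rw [pvRep_eq _ _ _ (by decide), pvRep_eq _ _ _ (by decide),
    pvRep_eq _ _ _ (by decide), pvRep_eq _ _ _ (by decide)]
  rfl

theorem pvPipeline2 (r : String) :
    (PySem.Str.join "" (PySem.List.slice
        (List.foldl (fun acc ip => acc ++ [ip.2, "{" ++ PySem.Int.toStr ip.1 ++ "}"]) []
          (PySem.List.enumerate ((PySem.Str.split? r "%S").getD [])))
        none (some (-1)))).toList
      = pvIvl 0 (pvSplit ['%', 'S'] r.toList) := by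
  obtain ⟨ps, hps⟩ : ∃ ps, PySem.Str.split? r "%S" = some ps := by
    cases h : PySem.Str.split? r "%S" with
    | none =>
      have hm := PySem.Str.split?_map r "%S"
      rw [h] at hm
      simp [PySem.Chars.split?] at hm
    | some ps => exact ⟨ps, rfl⟩
  have hmap : ps.map String.toList = PySem.Chars.splitOn r.toList ['%', 'S'] := by
    have hm := PySem.Str.split?_map r "%S"
    rw [hps] at hm
    simpa [PySem.Chars.split?] using hm
  have hsp : PySem.Chars.splitOn r.toList ['%', 'S'] = pvSplit ['%', 'S'] r.toList :=
    pvSplit_eq _ _ (by decide)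
  have hpsne : ps ≠ [] := by
    intro hnil
    rw [hnil, hsp] at hmap
    exact absurd hmap.symm (pvSplit_ne_nil _ _)
  rw [hps]
  simp only [Option.getD_some]
  rw [PySem.List.foldl_append_eq_flatMap
    (fun ip => [ip.2, "{" ++ PySem.Int.toStr ip.1 ++ "}"]) (PySem.List.enumerate ps 0) []]
  rw [List.nil_append, PySem.List.slice_to_neg_one, PySem.Str.toList_join]
  rw [show ("" : String).toList = ([] : List Char) from rfl]
  rw [pvLoop ps hpsne 0, hmap, hsp]

theorem pvPipeline (v : String) :
    PySem.Str.join "" (PySem.List.slice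
        (List.foldl (fun acc ip => acc ++ [ip.2, "{" ++ PySem.Int.toStr ip.1 ++ "}"]) []
          (PySem.List.enumerate ((PySem.Str.split?
            (PySem.Str.replace
              (PySem.Str.replace (PySem.Str.replace (PySem.Str.replace v "'" "\\'") "\\\"" "\"") "{" "{{")
              "}" "}}") "%S").getD [])))
        none (some (-1)))
      = String.ofList (pvScanB v.toList 0) := by
  apply String.toList_inj.mp
  rw [pvPipeline2, pvChainStr, pvMain]
  simp

-- ===== VERDICT (by name: the statement is the Claim_ definition above) =====
theorem string_to_linux_spec : Claim_equal_string_to_linux := by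
  intro line _ hpre
  unfold Pre_string_to_linux at hpre
  unfold Spec_string_to_linux string_to_linux string_to_linux_alt
  rw [if_pos hpre, if_pos hpre]
  dsimp only
  rw [pvPipeline]
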